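-- pv_equiv track=rewrite | github.com/justin13888/chromahash | spec/scan_order.py | triangular_scan_order
-- ===== SOURCE A (Python) =====
-- def triangular_scan_order(nx: int, ny: int) -> list[tuple[int, int]]:
--     """Return AC coefficient (cx, cy) pairs in scan order."""
--     order = []
--     for cy in range(ny):
--         cx_start = 1 if cy == 0 else 0
--         cx = cx_start
--         while cx * ny < nx * (ny - cy):
--             order.append((cx, cy))
--             cx += 1
--     return order
-- ===== SOURCE B (Python) =====
-- def triangular_scan_order(nx: int, ny: int) -> list[tuple[int, int]]:
--     """Return AC coefficient (cx, cy) pairs in scan order.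
--
--     Scans the full nx x ny rectangle and keeps the pairs strictly below the
--     anti-diagonal (cx*ny + cy*nx < nx*ny), excluding the DC pair (0, 0).
--     """
--     return [(cx, cy)
--             for cy in range(ny)
--             for cx in range(nx)
--             if cx * ny + cy * nx < nx * ny and (cx, cy) != (0, 0)]
-- ===== Notes on version B (the rewrite author's own statement) =====
-- stated objective: alternative
-- what changed: A walks each row with a while-loop whose start index and arithmetic stop bound are maintained per row; B instead scans the full nx-by-ny rectangle once and filters with the geometric anti-diagonal predicate, excluding the DC pair.
import Mathlib
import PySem

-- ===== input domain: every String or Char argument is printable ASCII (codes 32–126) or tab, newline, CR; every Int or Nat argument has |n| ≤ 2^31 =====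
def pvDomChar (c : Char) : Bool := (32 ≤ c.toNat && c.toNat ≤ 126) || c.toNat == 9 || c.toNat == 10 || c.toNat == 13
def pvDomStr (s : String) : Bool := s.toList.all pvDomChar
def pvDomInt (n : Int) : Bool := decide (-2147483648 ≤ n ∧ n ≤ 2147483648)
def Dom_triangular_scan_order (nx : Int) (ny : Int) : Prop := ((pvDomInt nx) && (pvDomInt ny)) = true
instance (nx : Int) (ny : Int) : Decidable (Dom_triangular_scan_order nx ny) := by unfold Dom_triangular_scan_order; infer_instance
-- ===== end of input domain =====

-- B replaces A's per-row while-loop (computed start index, arithmetic stop bound) by one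
-- full-rectangle scan filtered with the equivalent geometric predicate; objective: alternative.

-- ===== PORT A =====
-- inner 'while cx * ny < nx * (ny - cy): order.append((cx, cy)); cx += 1'.
-- The fuel argument only bounds the recursion; called with fuel = nx.toNat, which is
-- exact: the Python loop performs at most nx.toNat iterations (proved in whileA_eq below).
def whileA (nx ny cy cx : Int) : Nat → List (Int × Int)
  | 0 => []
  | fuel + 1 =>
    if cx * ny < nx * (ny - cy) then (cx, cy) :: whileA nx ny cy (cx + 1) fuel else []

def triangular_scan_order (nx : Int) (ny : Int) : List (Int × Int) :=
  (PySem.List.pyRange 0 ny 1).foldl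
    (fun order cy =>
      let cx_start : Int := if cy == 0 then 1 else 0
      order ++ whileA nx ny cy cx_start nx.toNat)
    []

-- ===== PORT B =====
-- '[(cx, cy) for cy in range(ny) for cx in range(nx) if cx*ny + cy*nx < nx*ny and (cx, cy) != (0, 0)]'
def triangular_scan_order_alt (nx : Int) (ny : Int) : List (Int × Int) :=
  (PySem.List.pyRange 0 ny 1).flatMap (fun cy =>
    ((PySem.List.pyRange 0 nx 1).filter
        (fun cx => decide (cx * ny + cy * nx < nx * ny) && !(cx == 0 && cy == 0))).map
      (fun cx => (cx, cy)))

-- ===== PRECONDITION & SPEC =====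
def Spec_triangular_scan_order (nx : Int) (ny : Int) (out : List (Int × Int)) : Prop := out = triangular_scan_order_alt nx ny
instance (nx : Int) (ny : Int) (out : List (Int × Int)) : Decidable (Spec_triangular_scan_order nx ny out) := by unfold Spec_triangular_scan_order; infer_instance

-- ===== CLAIM (what is proved, stated in full; the proofs are below) =====
def Claim_equal_triangular_scan_order : Prop := ∀ (nx : Int) (ny : Int), Dom_triangular_scan_order nx ny → Spec_triangular_scan_order nx ny (triangular_scan_order nx ny)

-- ===== LEMMAS AND PROOFS =====

-- A's while-loop from cx equals the filter of the remaining range [cx, nx).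
lemma whileA_eq (nx ny cy : Int) (hy : 0 < ny) (hcy0 : 0 ≤ cy) (hcy1 : cy < ny) :
    ∀ (fuel : Nat) (cx : Int), 0 ≤ cx → (nx - cx).toNat ≤ fuel →
      whileA nx ny cy cx fuel
        = ((PySem.List.pyRange cx nx 1).filter
            (fun c => decide (c * ny < nx * (ny - cy)))).map (fun c => (c, cy)) := by
  intro fuel
  induction fuel with
  | zero =>
    intro cx hcx hf
    have hnx : nx ≤ cx := by omega
    rw [PySem.List.pyRange_one_eq_nil hnx]
    rfl
  | succ f ih =>
    intro cx hcx hf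
    by_cases hcond : cx * ny < nx * (ny - cy)
    · have hpos : 0 < nx * (ny - cy) := lt_of_le_of_lt (by positivity) hcond
      have hnxpos : 0 < nx := by nlinarith [hpos, (show 0 < ny - cy by omega)]
      have hlt : cx < nx := by
        nlinarith [mul_le_mul_of_nonneg_left (show ny - cy ≤ ny by omega) hnxpos.le]
      rw [whileA]
      rw [if_pos hcond]
      rw [PySem.List.pyRange_one_cons hlt]
      rw [List.filter_cons_of_pos (by simpa using hcond)]
      rw [List.map_cons]
      rw [ih (cx + 1) (by omega) (by omega)]
    · have hnil : ((PySem.List.pyRange cx nx 1).filter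
          (fun c => decide (c * ny < nx * (ny - cy)))) = [] := by
        rw [List.filter_eq_nil_iff]
        intro c hc
        have hge : cx ≤ c := (PySem.List.mem_pyRange_one.mp hc).1
        simp only [decide_eq_true_eq]
        intro hlt
        exact hcond (lt_of_le_of_lt (by nlinarith) hlt)
      rw [whileA, if_neg hcond, hnil]
      rfl

-- B's row predicate is A's stop condition (plus the DC exclusion).
lemma pred_iff (nx ny cy cx : Int) :
    (cx * ny + cy * nx < nx * ny) ↔ (cx * ny < nx * (ny - cy)) := by
  have h : nx * (ny - cy) = nx * ny - cy * nx := by ring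
  omega

lemma row_eq (nx ny cy : Int) (hy : 0 < ny) (hcy0 : 0 ≤ cy) (hcy1 : cy < ny) :
    whileA nx ny cy (if cy == 0 then 1 else 0) nx.toNat
      = ((PySem.List.pyRange 0 nx 1).filter
          (fun cx => decide (cx * ny + cy * nx < nx * ny) && !(cx == 0 && cy == 0))).map
        (fun cx => (cx, cy)) := by
  by_cases hcy : cy = 0
  · subst hcy
    simp only [beq_self_eq_true, if_pos]
    rw [whileA_eq nx ny 0 hy le_rfl hy nx.toNat 1 (by omega) (by omega)]
    by_cases hnx : 0 < nx
    · rw [PySem.List.pyRange_one_cons hnx]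
      rw [List.filter_cons_of_neg (by simp)]
      apply congrArg
      apply List.filter_congr
      intro c hc
      have h1 : (1 : Int) ≤ c := (PySem.List.mem_pyRange_one.mp hc).1
      have : ¬ (c = 0) := by omega
      simp [this]
    · rw [PySem.List.pyRange_one_eq_nil (by omega), PySem.List.pyRange_one_eq_nil (by omega)]
      rfl
  · have hif : (if cy == (0 : Int) then (1 : Int) else 0) = 0 := by simp [hcy]
    rw [hif, whileA_eq nx ny cy hy hcy0 hcy1 nx.toNat 0 le_rfl (by omega)]
    apply congrArg
    apply List.filter_congr
    intro c hc
    simp [pred_iff nx ny cy c, hcy]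

lemma flatMap_congr_mem {α β : Type} (l : List α) (f g : α → List β)
    (h : ∀ x ∈ l, f x = g x) : l.flatMap f = l.flatMap g := by
  induction l with
  | nil => rfl
  | cons a l ih =>
    simp only [List.flatMap_cons]
    rw [h a (by simp), ih (fun x hx => h x (List.mem_cons_of_mem a hx))]

-- ===== VERDICT (by name: the statement is the Claim_ definition above) =====
theorem triangular_scan_order_spec : Claim_equal_triangular_scan_order := by
  intro nx ny _
  unfold Spec_triangular_scan_order triangular_scan_order triangular_scan_order_alt
  rw [PySem.List.foldl_append_eq_flatMap]
  rw [List.nil_append]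
  apply flatMap_congr_mem
  intro cy hcy
  have h := PySem.List.mem_pyRange_one.mp hcy
  exact row_eq nx ny cy (by omega) h.1 h.2
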